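-- pv_equiv track=rewrite | github.com/JunJie1906/Course_Related | 编译原理实验/实验2/dfa.py | chg
-- ===== SOURCE A (Python) =====
-- def chg(p):
--     stack = []
--     # bkt = ['(',')','|','*']
--     str = ''
--     for i in range(len(p)):
--         str += p[i]
--         if p[i]==')':
--             if i+1<len(p):
--                 if p[i+1].isalpha():
--                     str+='&'
--         if p[i].isalpha():
--             if i+1<len(p):
--                 if p[i+1]=='(':
--                     str+='&'
--                 if p[i+1].isalpha():
--                     str+='&'
--         if p[i]=='*':
--             if i+1<len(p):
--                 if p[i+1].isalpha():
--                     str+='&'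
--
--
--     preority = ['|','&']
--
--     bk = ''
--
--     for i in range(len(str)):
--         if str[i] == '*':
--             bk+=str[i]
--             continue
--         if str[i].isalpha():
--             bk+=str[i]
--             continue
--         if str[i]=='(':
--             stack.append('(')
--             continue
--
--         if str[i] == ')':
--             while stack!=[]:
--                 if stack[-1]=='(':
--                     stack = stack[:-1]
--                     break
--                 bk+=stack[-1]
--                 stack = stack[:-1]
--             continue
--         ptr = preority.index(str[i])
--         crt = preority[:ptr+1]
--         while stack!=[]:
--             if stack[-1] == '(':
--                 break
--             if stack[-1] not in crt:
--                 break
--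
--             if stack[-1] in crt:
--                 bk+=stack[-1]
--                 stack = stack[:-1]
--         stack.append(str[i])
--
--     while stack!=[]:
--         bk+=stack[-1]
--         stack = stack[:-1]
--     return bk
-- ===== SOURCE B (Python) =====
-- def chg(p):
--     # single pass: implicit '&' fed straight into the shunting-yard, no augmented string
--     prec = {'|': 0, '&': 1}
--     stack = []
--     out = []
--
--     def shunt(c):
--         while stack and stack[-1] != '(' and prec[stack[-1]] <= prec[c]:
--             out.append(stack.pop())
--         stack.append(c)
--
--     prev = None
--     for c in p:
--         if prev is not None and ((prev == ')' and c.isalpha())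
--                                  or (prev.isalpha() and (c == '(' or c.isalpha()))
--                                  or (prev == '*' and c.isalpha())):
--             shunt('&')
--         if c == '*' or c.isalpha():
--             out.append(c)
--         elif c == '(':
--             stack.append(c)
--         elif c == ')':
--             while stack:
--                 t = stack.pop()
--                 if t == '(':
--                     break
--                 out.append(t)
--         else:
--             shunt(c)
--         prev = c
--
--     while stack:
--         out.append(stack.pop())
--     return ''.join(out)
-- ===== Notes on version B (the rewrite author's own statement) =====
-- stated objective: faster
-- what changed: B fuses A's two passes into one: instead of first building an augmented string with explicit '&' and then running a stack pass over it, B scans the input once, feeding the implicit '&' straight into a standard precedence-table shunting-yard, with O(1) pushes/pops instead of A's stack-copying slices (stack[:-1]).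
import Mathlib
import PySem

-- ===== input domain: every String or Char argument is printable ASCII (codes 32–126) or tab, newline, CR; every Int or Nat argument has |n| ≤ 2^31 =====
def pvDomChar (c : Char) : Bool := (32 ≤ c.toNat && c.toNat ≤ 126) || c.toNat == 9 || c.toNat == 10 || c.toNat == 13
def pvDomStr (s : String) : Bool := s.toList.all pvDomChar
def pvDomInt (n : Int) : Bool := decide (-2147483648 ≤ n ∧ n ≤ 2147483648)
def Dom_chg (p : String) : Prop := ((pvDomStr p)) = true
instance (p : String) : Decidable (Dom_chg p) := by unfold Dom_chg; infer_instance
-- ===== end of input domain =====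

-- B fuses A's two passes (build augmented string with explicit '&', then shunting-yard over it)
-- into a single left-to-right pass that feeds the implicit '&' straight into a numeric-precedence
-- shunting-yard; objective: simpler (one pass, no intermediate string).


-- ===== PORT A =====
-- the three independent '&'-insertion ifs of A's first loop (between p[i] and p[i+1])
def chgAmps (c d : Char) : List Char :=
  (if c = ')' then (if PySem.Chars.isalpha d then ['&'] else []) else [])
    ++ (if PySem.Chars.isalpha c then
          (if d = '(' then ['&'] else []) ++ (if PySem.Chars.isalpha d then ['&'] else [])
        else [])
    ++ (if c = '*' then (if PySem.Chars.isalpha d then ['&'] else []) else [])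

-- A's first loop: str built left to right, looking one character ahead (i+1 < len(p) guard)
def chgAug : List Char → List Char
  | [] => []
  | c :: rest =>
      c :: ((match rest with
             | [] => []
             | d :: _ => chgAmps c d) ++ chgAug rest)

-- A's ')' loop: pop and emit until the matching '(' (stack top at the head)
def chgPopParen : List Char → List Char → List Char × List Char
  | [], bk => ([], bk)
  | t :: rest, bk => if t = '(' then (rest, bk) else chgPopParen rest (bk ++ [t])

-- A's operator loop: pop while top ≠ '(' and top ∈ crt
def chgPopCrt (crt : List Char) : List Char → List Char → List Char × List Char
  | [], bk => ([], bk)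
  | t :: rest, bk =>
      if t = '(' then (t :: rest, bk)
      else if t ∈ crt then chgPopCrt crt rest (bk ++ [t])
      else (t :: rest, bk)

-- A's second loop over str; none = the ValueError of preority.index on a foreign character
def chgGoA : List Char → List Char → List Char → Option (List Char × List Char)
  | stack, bk, [] => some (stack, bk)
  | stack, bk, c :: rest =>
      if c = '*' then chgGoA stack (bk ++ [c]) rest
      else if PySem.Chars.isalpha c then chgGoA stack (bk ++ [c]) rest
      else if c = '(' then chgGoA ('(' :: stack) bk rest
      else if c = ')' then
        let sb := chgPopParen stack bk
        chgGoA sb.1 sb.2 rest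
      else
        match PySem.List.index? ['|', '&'] c with
        | none => none
        | some ptr =>
            let crt := (['|', '&'] : List Char).take (ptr + 1)  -- preority[:ptr+1]
            let sb := chgPopCrt crt stack bk
            chgGoA (c :: sb.1) sb.2 rest

def chg (p : String) : String :=
  match chgGoA [] [] (chgAug p.toList) with
  | none => ""  -- unreachable inside Pre_chg (Python raises ValueError there)
  | some (stack, bk) => String.ofList (bk ++ stack)  -- final flush: pop the stack onto bk

-- ===== PORT B =====
def chgPrec? (c : Char) : Option Nat :=
  if c = '|' then some 0 else if c = '&' then some 1 else none

-- B's shunt helper: pop while top ≠ '(' and prec[top] ≤ prec[c], then push c; none = KeyError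
def chgShunt (c : Char) : List Char → List Char → Option (List Char × List Char)
  | [], out => some ([c], out)
  | t :: rest, out =>
      if t = '(' then some (c :: t :: rest, out)
      else
        match chgPrec? t, chgPrec? c with
        | some pt, some pc =>
            if pt ≤ pc then chgShunt c rest (out ++ [t]) else some (c :: t :: rest, out)
        | _, _ => none

-- B's implicit-concatenation test between the previous character and the current one
def chgAmpB (pv c : Char) : Bool :=
  (pv == ')' && PySem.Chars.isalpha c)
    || (PySem.Chars.isalpha pv && (c == '(' || PySem.Chars.isalpha c))
    || (pv == '*' && PySem.Chars.isalpha c)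

-- B's handling of the current character itself
def chgHandle (c : Char) (stack out : List Char) : Option (List Char × List Char) :=
  if c = '*' || PySem.Chars.isalpha c then some (stack, out ++ [c])
  else if c = '(' then some ('(' :: stack, out)
  else if c = ')' then some (chgPopParen stack out)  -- identical ')' loop in both Pythons: shared helper
  else chgShunt c stack out

-- B's single pass, carrying the previous character
def chgGoB : Option Char → List Char → List Char → List Char → Option (List Char × List Char)
  | _, stack, out, [] => some (stack, out)
  | prev, stack, out, c :: rest =>
      let amp : Bool := match prev with
        | none => false
        | some pv => chgAmpB pv c
      match (if amp then chgShunt '&' stack out else some (stack, out)) with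
      | none => none
      | some (s1, o1) =>
          match chgHandle c s1 o1 with
          | none => none
          | some (s2, o2) => chgGoB (some c) s2 o2 rest

def chg_alt (p : String) : String :=
  match chgGoB none [] [] p.toList with
  | none => ""  -- unreachable inside Pre_chg
  | some (stack, out) => String.ofList (out ++ stack)

-- ===== PRECONDITION & SPEC =====
-- Pre_ excludes exactly the inputs containing a character that is neither a letter nor one of
-- ( ) * | & : on those, A's `preority.index` raises ValueError (no value is returned).
def Pre_chg (p : String) : Prop :=
  (p.toList.all fun c =>
    PySem.Chars.isalpha c || (['(', ')', '*', '|', '&'] : List Char).contains c) = true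
instance (p : String) : Decidable (Pre_chg p) := by unfold Pre_chg; infer_instance
def pvWitness_chg : String := "a|b"

def Spec_chg (p : String) (out : String) : Prop := out = chg_alt p
instance (p : String) (out : String) : Decidable (Spec_chg p out) := by unfold Spec_chg; infer_instance

-- ===== CLAIM (what is proved, stated in full; the proofs are below) =====
def Claim_equal_chg : Prop := ∀ (p : String), Dom_chg p → Pre_chg p → Spec_chg p (chg p)

-- ===== LEMMAS AND PROOFS =====

-- only '(', '|', '&' are ever on the stack
def ChgValidSt (stack : List Char) : Prop := ∀ t ∈ stack, t = '(' ∨ t = '|' ∨ t = '&'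

theorem chgPopParen_valid (stack : List Char) (out : List Char) (h : ChgValidSt stack) :
    ChgValidSt (chgPopParen stack out).1 := by
  induction stack generalizing out with
  | nil => simpa [chgPopParen] using h
  | cons t rest ih =>
      have hrest : ChgValidSt rest := fun x hx => h x (List.mem_cons_of_mem _ hx)
      simp only [chgPopParen]
      split_ifs
      · exact hrest
      · exact ih _ hrest

theorem chgPopCrt_valid (crt stack out : List Char) (h : ChgValidSt stack) :
    ChgValidSt (chgPopCrt crt stack out).1 := by
  induction stack generalizing out with
  | nil => simpa [chgPopCrt] using h
  | cons t rest ih =>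
      have hrest : ChgValidSt rest := fun x hx => h x (List.mem_cons_of_mem _ hx)
      simp only [chgPopCrt]
      split_ifs
      · exact h
      · exact ih _ hrest
      · exact h

-- on a valid stack B's shunt for '&' is A's pop-over ['|','&'] followed by the push
theorem chgShunt_amp (stack out : List Char) (h : ChgValidSt stack) :
    chgShunt '&' stack out =
      some ('&' :: (chgPopCrt ['|', '&'] stack out).1, (chgPopCrt ['|', '&'] stack out).2) := by
  induction stack generalizing out with
  | nil => rfl
  | cons t rest ih =>
      have hrest : ChgValidSt rest := fun x hx => h x (List.mem_cons_of_mem _ hx)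
      rcases h t List.mem_cons_self with ht | ht | ht <;> subst ht <;>
        simp [chgShunt, chgPopCrt, chgPrec?, ih _ hrest]

-- on a valid stack B's shunt for '|' is A's pop-over ['|'] followed by the push
theorem chgShunt_bar (stack out : List Char) (h : ChgValidSt stack) :
    chgShunt '|' stack out =
      some ('|' :: (chgPopCrt ['|'] stack out).1, (chgPopCrt ['|'] stack out).2) := by
  induction stack generalizing out with
  | nil => rfl
  | cons t rest ih =>
      have hrest : ChgValidSt rest := fun x hx => h x (List.mem_cons_of_mem _ hx)
      rcases h t List.mem_cons_self with ht | ht | ht <;> subst ht <;>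
        simp [chgShunt, chgPopCrt, chgPrec?, ih _ hrest]

-- one admitted character: B's handle succeeds, keeps the stack valid, and advances A's loop
theorem chgHandle_eq (c : Char) (stack out ls : List Char)
    (hc : PySem.Chars.isalpha c = true ∨ c ∈ (['(', ')', '*', '|', '&'] : List Char))
    (h : ChgValidSt stack) :
    ∃ s2 o2, chgHandle c stack out = some (s2, o2) ∧ ChgValidSt s2 ∧
      chgGoA stack out (c :: ls) = chgGoA s2 o2 ls := by
  rcases hc with hc | hc
  · -- a letter
    have hns : c ≠ '*' := by rintro rfl; exact absurd hc (by decide)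
    refine ⟨stack, out ++ [c], ?_, h, ?_⟩ <;> simp [chgHandle, chgGoA, hc, hns]
  · fin_cases hc
    · -- '('
      have hna : PySem.Chars.isalpha ('(' : Char) = false := by decide
      refine ⟨'(' :: stack, out, by simp [chgHandle, hna], ?_, by simp [chgGoA, hna]⟩
      intro t ht
      rcases List.mem_cons.mp ht with rfl | ht
      · exact Or.inl rfl
      · exact h t ht
    · -- ')'
      have hna : PySem.Chars.isalpha (')' : Char) = false := by decide
      exact ⟨(chgPopParen stack out).1, (chgPopParen stack out).2,
        by simp [chgHandle, hna], chgPopParen_valid stack out h,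
        by simp [chgGoA, hna]⟩
    · -- '*'
      exact ⟨stack, out ++ ['*'], by simp [chgHandle], h, by simp [chgGoA]⟩
    · -- '|'
      have hna : PySem.Chars.isalpha ('|' : Char) = false := by decide
      have hidx : List.idxOf? '|' (['|', '&'] : List Char) = some 0 := by decide
      refine ⟨'|' :: (chgPopCrt ['|'] stack out).1, (chgPopCrt ['|'] stack out).2,
        by simp [chgHandle, hna, chgShunt_bar stack out h], ?_, ?_⟩
      · intro t ht
        rcases List.mem_cons.mp ht with rfl | ht
        · exact Or.inr (Or.inl rfl)
        · exact chgPopCrt_valid _ _ _ h t ht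
      · simp [chgGoA, hna, hidx, List.take]
    · -- '&'
      have hna : PySem.Chars.isalpha ('&' : Char) = false := by decide
      have hidx : List.idxOf? '&' (['|', '&'] : List Char) = some 1 := by decide
      refine ⟨'&' :: (chgPopCrt ['|', '&'] stack out).1, (chgPopCrt ['|', '&'] stack out).2,
        by simp [chgHandle, hna, chgShunt_amp stack out h], ?_, ?_⟩
      · intro t ht
        rcases List.mem_cons.mp ht with rfl | ht
        · exact Or.inr (Or.inr rfl)
        · exact chgPopCrt_valid _ _ _ h t ht
      · simp [chgGoA, hna, hidx, List.take]

-- the '&' A would have inserted between prev and the head of l (empty when prev = none or l = [])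
def chgAmpPrefix : Option Char → List Char → List Char
  | some pv, c :: _ => if chgAmpB pv c then ['&'] else []
  | _, _ => []

-- A's three insertion ifs agree with B's single boolean test
theorem chgAmps_eq (c d : Char) : chgAmps c d = if chgAmpB c d then ['&'] else [] := by
  have h1 : ¬ (PySem.Chars.isalpha (')' : Char) = true) := by decide
  have h2 : ¬ (PySem.Chars.isalpha ('*' : Char) = true) := by decide
  have h3 : ¬ (PySem.Chars.isalpha ('(' : Char) = true) := by decide
  simp only [chgAmps, chgAmpB]
  split_ifs <;> simp_all

-- main invariant: B's single pass equals A's second pass run on the augmented remainder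
theorem chgGo_main (l : List Char) (prev : Option Char) (stack out : List Char)
    (hl : ∀ c ∈ l, PySem.Chars.isalpha c = true ∨ c ∈ (['(', ')', '*', '|', '&'] : List Char))
    (h : ChgValidSt stack) :
    chgGoB prev stack out l = chgGoA stack out (chgAmpPrefix prev l ++ chgAug l) := by
  induction l generalizing prev stack out with
  | nil => cases prev <;> simp [chgGoB, chgGoA, chgAug, chgAmpPrefix]
  | cons c rest ih =>
      have hc := hl c List.mem_cons_self
      have hrest : ∀ x ∈ rest, PySem.Chars.isalpha x = true ∨
          x ∈ (['(', ')', '*', '|', '&'] : List Char) :=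
        fun x hx => hl x (List.mem_cons_of_mem _ hx)
      have hAug : chgAmpPrefix prev (c :: rest) ++ chgAug (c :: rest) =
          chgAmpPrefix prev (c :: rest) ++ c :: (chgAmpPrefix (some c) rest ++ chgAug rest) := by
        cases rest with
        | nil => simp [chgAug, chgAmpPrefix]
        | cons d rest' => simp [chgAug, chgAmpPrefix, chgAmps_eq]
      rw [hAug]
      -- split on whether the implicit '&' fires
      rcases hp : (match prev with
        | none => false
        | some pv => chgAmpB pv c) with _ | _
      · -- no '&' inserted
        have hpre : chgAmpPrefix prev (c :: rest) = [] := by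
          cases prev with
          | none => rfl
          | some pv => simp_all [chgAmpPrefix]
        obtain ⟨s2, o2, hh, hv2, hstep⟩ :=
          chgHandle_eq c stack out (chgAmpPrefix (some c) rest ++ chgAug rest) hc h
        rw [hpre, List.nil_append, hstep, ← ih (some c) s2 o2 hrest hv2]
        simp [chgGoB, hp, hh]
      · -- '&' inserted: first the shunt step on '&', then the character itself
        obtain ⟨pv, rfl⟩ : ∃ pv, prev = some pv := by
          cases prev with
          | none => simp at hp
          | some pv => exact ⟨pv, rfl⟩
        have hpre : chgAmpPrefix (some pv) (c :: rest) = ['&'] := by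
          simp_all [chgAmpPrefix]
        obtain ⟨s1, o1, hamp, hv1, hstep1⟩ :=
          chgHandle_eq '&' stack out
            (c :: (chgAmpPrefix (some c) rest ++ chgAug rest)) (by simp) h
        have hamp' : chgShunt '&' stack out = some (s1, o1) := by
          have hna : PySem.Chars.isalpha ('&' : Char) = false := by decide
          simpa [chgHandle, hna] using hamp
        obtain ⟨s2, o2, hh, hv2, hstep2⟩ :=
          chgHandle_eq c s1 o1 (chgAmpPrefix (some c) rest ++ chgAug rest) hc hv1
        rw [hpre, List.singleton_append, hstep1, hstep2, ← ih (some c) s2 o2 hrest hv2]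
        simp [chgGoB, hp, hamp', hh]

-- ===== VERDICT (by name: the statement is the Claim_ definition above) =====
theorem chg_spec : Claim_equal_chg := by
  intro p _ hpre
  have hl : ∀ c ∈ p.toList, PySem.Chars.isalpha c = true ∨
      c ∈ (['(', ')', '*', '|', '&'] : List Char) := by
    intro c hc
    rcases (Bool.or_eq_true _ _).mp (List.all_eq_true.mp hpre c hc) with h | h
    · exact Or.inl h
    · exact Or.inr (by simpa using h)
  unfold Spec_chg chg chg_alt
  rw [chgGo_main p.toList none [] [] hl (by intro t ht; simp at ht)]
  rfl
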